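-- pv_equiv track=rewrite | github.com/pypi-data/pypi-mirror-400 | packages/rosettes/rosettes-0.1.0-py3-none-any.whl/rosettes/lexers/kida_sm.py | _find_closing_percent
-- ===== SOURCE A (Python) =====
-- def _find_closing_percent(
--     code: str, pos: int, line: int, line_start: int
-- ) -> tuple[int, int, int]:
--     """Find closing %} and return updated position and line info."""
--     length = len(code)
--     while pos < length:
--         if code[pos : pos + 2] == "%}":
--             return pos + 2, line, line_start
--         if code[pos] == "\n":
--             line += 1
--             line_start = pos + 1
--         # Skip strings
--         if code[pos] in "\"'":
--             quote = code[pos]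
--             pos += 1
--             while pos < length and code[pos] != quote:
--                 if code[pos] == "\\" and pos + 1 < length:
--                     pos += 2
--                     continue
--                 if code[pos] == "\n":
--                     line += 1
--                     line_start = pos + 1
--                 pos += 1
--             if pos < length:
--                 pos += 1
--             continue
--         pos += 1
--     return pos, line, line_start
-- ===== SOURCE B (Python) =====
-- def _find_closing_percent(
--     code: str, pos: int, line: int, line_start: int
-- ) -> tuple[int, int, int]:
--     """Find closing %} and return updated position and line info.
--
--     Jump-based scan: instead of examining every character, each step uses
--     str.find to locate the next *interesting* occurrence ("%}", a quote or
--     a newline outside strings; the closing quote, a backslash or a newline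
--     inside a string) and jumps straight to it; the characters in between
--     need no work."""
--     length = len(code)
--     quote = None
--     while pos < length:
--         if quote is None:
--             cands = [j for j in (code.find("%}", pos), code.find('"', pos),
--                                  code.find("'", pos), code.find("\n", pos))
--                      if j != -1]
--             if not cands:
--                 return length, line, line_start
--             j = min(cands)
--             c = code[j]
--             if c == "%":
--                 return j + 2, line, line_start
--             if c == "\n":
--                 line += 1
--                 line_start = j + 1
--             else:
--                 quote = c
--             pos = j + 1
--         else:
--             cands = [j for j in (code.find(quote, pos), code.find("\\", pos),
--                                  code.find("\n", pos))
--                      if j != -1]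
--             if not cands:
--                 return length, line, line_start
--             j = min(cands)
--             c = code[j]
--             if c == "\\":
--                 pos = j + 2 if j + 1 < length else j + 1
--             elif c == quote:
--                 quote = None
--                 pos = j + 1
--             else:
--                 line += 1
--                 line_start = j + 1
--                 pos = j + 1
--     return pos, line, line_start
-- ===== Notes on version B (the rewrite author's own statement) =====
-- stated objective: faster
-- what changed: Replaces A's per-character nested scan (outer loop plus inner string-skipping loop examining every character) by a jump scan: each step uses str.find to locate the next interesting occurrence (%}/quote/newline outside strings; closing quote/backslash/newline inside) and jumps to the minimum of those positions, so uninteresting characters are handled by C-level str.find instead of the interpreter loop.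
-- outside the precondition, e.g. on _find_closing_percent('%}}\n"\\\\', -3, 1, 0): A returns (7, 2, 4), B returns (7, 1, 0); on _find_closing_percent('ab', -5, 1, 0): A raises IndexError, B returns (2, 1, 0)
import Mathlib
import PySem

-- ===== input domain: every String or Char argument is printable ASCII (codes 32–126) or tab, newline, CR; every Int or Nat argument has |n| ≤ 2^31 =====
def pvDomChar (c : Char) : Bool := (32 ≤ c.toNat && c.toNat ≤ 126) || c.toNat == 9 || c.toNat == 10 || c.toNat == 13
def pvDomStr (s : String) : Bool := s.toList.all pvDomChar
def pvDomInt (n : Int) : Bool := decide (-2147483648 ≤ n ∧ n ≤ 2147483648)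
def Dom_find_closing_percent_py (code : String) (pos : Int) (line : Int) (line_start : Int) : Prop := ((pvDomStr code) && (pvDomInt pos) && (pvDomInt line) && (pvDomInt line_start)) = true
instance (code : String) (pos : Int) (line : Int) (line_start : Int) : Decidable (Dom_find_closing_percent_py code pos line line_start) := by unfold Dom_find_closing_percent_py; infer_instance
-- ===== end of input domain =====

-- B replaces A's per-character nested scan by str.find-driven jumps to the next interesting
-- occurrence (objective: faster by a constant factor, a timing run measured it). Pre_
-- restricts to nonnegative positions, the lexer's natural domain.


-- ===== PORT A =====
-- The `fuel` argument of each loop is purely a totality device (structural recursion);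
-- it is always called with enough fuel (≥ remaining characters + 1), so it never runs out.

-- inner `while pos < length and code[pos] != quote` string-skipping loop of A
def pvA_inner (cs : List Char) (q : Char) : Nat → Nat → Int → Int → Nat × Int × Int
  | 0, i, line, ls => (i, line, ls)
  | fuel + 1, i, line, ls =>
    if h : i < cs.length then
      if cs[i] ≠ q then
        if cs[i] = '\\' ∧ i + 1 < cs.length then
          pvA_inner cs q fuel (i + 2) line ls
        else if cs[i] = '\n' then
          pvA_inner cs q fuel (i + 1) (line + 1) ((i : Int) + 1)
        else
          pvA_inner cs q fuel (i + 1) line ls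
      else (i, line, ls)
    else (i, line, ls)

-- outer `while pos < length` loop of A; the two-char slice test code[pos:pos+2]=="%}" is
-- exact for 0 ≤ pos as (cs.drop i).take 2
def pvA_outer (cs : List Char) : Nat → Nat → Int → Int → Nat × Int × Int
  | 0, i, line, ls => (i, line, ls)
  | fuel + 1, i, line, ls =>
    if h : i < cs.length then
      if (cs.drop i).take 2 = ['%', '}'] then (i + 2, line, ls)
      else
        let line2 := if cs[i] = '\n' then line + 1 else line
        let ls2 := if cs[i] = '\n' then ((i : Int) + 1) else ls
        if cs[i] = '"' ∨ cs[i] = '\'' then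
          let r := pvA_inner cs cs[i] (cs.length + 1) (i + 1) line2 ls2
          if r.1 < cs.length then pvA_outer cs fuel (r.1 + 1) r.2.1 r.2.2 else r
        else pvA_outer cs fuel (i + 1) line2 ls2
    else (i, line, ls)

def find_closing_percent_py (code : String) (pos : Int) (line : Int) (line_start : Int) : Int × Int × Int :=
  let r := pvA_outer code.toList (code.toList.length + 1) pos.toNat line line_start
  ((r.1 : Int), r.2.1, r.2.2)

-- ===== PORT B =====
-- B's flat loop: each step collects the candidate `str.find` results for the patterns that are
-- interesting in the current mode (`st = some q` means inside a q-string), filters out the -1s,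
-- and jumps to their minimum; `fuel` is again only a totality device.
def pvB_loop (cs : List Char) : Nat → Nat → Int → Int → Option Char → Int × Int × Int
  | 0, i, line, ls, _ => ((i : Int), line, ls)
  | fuel + 1, i, line, ls, st =>
    if i < cs.length then
      match st with
      | none =>
        let cands := ([PySem.Chars.findFrom cs ['%', '}'] (i : Int) none,
                       PySem.Chars.findFrom cs ['"'] (i : Int) none,
                       PySem.Chars.findFrom cs ['\''] (i : Int) none,
                       PySem.Chars.findFrom cs ['\n'] (i : Int) none]).filter (· ≠ -1)
        match PySem.List.min? cands (fun x => x) with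
        | none => ((cs.length : Int), line, ls)
        | some j =>
          let c := cs.getD j.toNat ' '
          if c = '%' then (j + 2, line, ls)
          else if c = '\n' then pvB_loop cs fuel (j.toNat + 1) (line + 1) (j + 1) none
          else pvB_loop cs fuel (j.toNat + 1) line ls (some c)
      | some q =>
        let cands := ([PySem.Chars.findFrom cs [q] (i : Int) none,
                       PySem.Chars.findFrom cs ['\\'] (i : Int) none,
                       PySem.Chars.findFrom cs ['\n'] (i : Int) none]).filter (· ≠ -1)
        match PySem.List.min? cands (fun x => x) with
        | none => ((cs.length : Int), line, ls)
        | some j =>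
          let c := cs.getD j.toNat ' '
          if c = '\\' then
            pvB_loop cs fuel (if j.toNat + 1 < cs.length then j.toNat + 2 else j.toNat + 1) line ls (some q)
          else if c = q then pvB_loop cs fuel (j.toNat + 1) line ls none
          else pvB_loop cs fuel (j.toNat + 1) (line + 1) (j + 1) (some q)
    else ((i : Int), line, ls)

def find_closing_percent_py_alt (code : String) (pos : Int) (line : Int) (line_start : Int) : Int × Int × Int :=
  pvB_loop code.toList (code.toList.length + 1) pos.toNat line line_start none

-- ===== PRECONDITION & SPEC =====
-- Pre_ excludes negative positions: there Python's negative-index wraparound makes A's (and B's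
-- str.find bounds') scan start at an accidental place (and A raises IndexError for
-- pos < -len(code)); a negative scan position is outside the lexer's natural domain.
def Pre_find_closing_percent_py (code : String) (pos : Int) (line : Int) (line_start : Int) : Prop :=
  0 ≤ pos
instance (code : String) (pos : Int) (line : Int) (line_start : Int) : Decidable (Pre_find_closing_percent_py code pos line line_start) := by unfold Pre_find_closing_percent_py; infer_instance

def pvWitness_find_closing_percent_py : String × Int × Int × Int := ("a\"%}\"b%}", 0, 1, 0)

def Spec_find_closing_percent_py (code : String) (pos : Int) (line : Int) (line_start : Int) (out : Int × Int × Int) : Prop := out = find_closing_percent_py_alt code pos line line_start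
instance (code : String) (pos : Int) (line : Int) (line_start : Int) (out : Int × Int × Int) : Decidable (Spec_find_closing_percent_py code pos line line_start out) := by unfold Spec_find_closing_percent_py; infer_instance

-- ===== CLAIM (what is proved, stated in full; the proofs are below) =====
def Claim_equal_find_closing_percent_py : Prop := ∀ (code : String) (pos : Int) (line : Int) (line_start : Int), Dom_find_closing_percent_py code pos line line_start → Pre_find_closing_percent_py code pos line line_start → Spec_find_closing_percent_py code pos line line_start (find_closing_percent_py code pos line line_start)

-- ===== LEMMAS AND PROOFS =====

-- ---- A-side step lemmas (one unfolding of each fueled loop per branch) ----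
theorem pvA_inner_end (cs : List Char) (q : Char) (i : Nat) (line ls : Int)
    (h : ¬ i < cs.length) : ∀ f, pvA_inner cs q f i line ls = (i, line, ls)
  | 0 => rfl
  | f + 1 => by rw [pvA_inner]; simp [h]

theorem pvA_inner_stop (cs : List Char) (q : Char) (f i : Nat) (line ls : Int)
    (h : i < cs.length) (hq : cs[i] = q) : pvA_inner cs q (f + 1) i line ls = (i, line, ls) := by
  rw [pvA_inner]; simp [h, hq]

theorem pvA_inner_esc (cs : List Char) (q : Char) (f i : Nat) (line ls : Int)
    (h : i < cs.length) (hq : ¬ cs[i] = q) (hb : cs[i] = '\\' ∧ i + 1 < cs.length) :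
    pvA_inner cs q (f + 1) i line ls = pvA_inner cs q f (i + 2) line ls := by
  rw [pvA_inner]; simp only [h, dite_true]; rw [if_pos (by simp [hq]), if_pos hb]

theorem pvA_inner_nl (cs : List Char) (q : Char) (f i : Nat) (line ls : Int)
    (h : i < cs.length) (hq : ¬ cs[i] = q) (hb : ¬ (cs[i] = '\\' ∧ i + 1 < cs.length))
    (hn : cs[i] = '\n') :
    pvA_inner cs q (f + 1) i line ls = pvA_inner cs q f (i + 1) (line + 1) ((i : Int) + 1) := by
  rw [pvA_inner]; simp only [h, dite_true]
  rw [if_pos (by simp [hq]), if_neg hb, if_pos hn]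

theorem pvA_inner_other (cs : List Char) (q : Char) (f i : Nat) (line ls : Int)
    (h : i < cs.length) (hq : ¬ cs[i] = q) (hb : ¬ (cs[i] = '\\' ∧ i + 1 < cs.length))
    (hn : ¬ cs[i] = '\n') :
    pvA_inner cs q (f + 1) i line ls = pvA_inner cs q f (i + 1) line ls := by
  rw [pvA_inner]; simp only [h, dite_true]
  rw [if_pos (by simp [hq]), if_neg hb, if_neg hn]

theorem pvA_outer_end (cs : List Char) (i : Nat) (line ls : Int)
    (h : ¬ i < cs.length) : ∀ f, pvA_outer cs f i line ls = (i, line, ls)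
  | 0 => rfl
  | f + 1 => by rw [pvA_outer]; simp [h]

theorem pvA_outer_pc (cs : List Char) (f i : Nat) (line ls : Int)
    (h : i < cs.length) (hpc : (cs.drop i).take 2 = ['%', '}']) :
    pvA_outer cs (f + 1) i line ls = (i + 2, line, ls) := by
  rw [pvA_outer]; simp [h, hpc]

theorem pvA_outer_quote (cs : List Char) (f i : Nat) (line ls : Int)
    (h : i < cs.length) (hpc : ¬ (cs.drop i).take 2 = ['%', '}'])
    (hqo : cs[i] = '"' ∨ cs[i] = '\'') :
    pvA_outer cs (f + 1) i line ls =
      (let r := pvA_inner cs cs[i] (cs.length + 1) (i + 1)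
        (if cs[i] = '\n' then line + 1 else line)
        (if cs[i] = '\n' then ((i : Int) + 1) else ls)
       if r.1 < cs.length then pvA_outer cs f (r.1 + 1) r.2.1 r.2.2 else r) := by
  rw [pvA_outer]; simp only [h, dite_true]; rw [if_neg hpc, if_pos hqo]

theorem pvA_outer_step (cs : List Char) (f i : Nat) (line ls : Int)
    (h : i < cs.length) (hpc : ¬ (cs.drop i).take 2 = ['%', '}'])
    (hqo : ¬ (cs[i] = '"' ∨ cs[i] = '\'')) :
    pvA_outer cs (f + 1) i line ls =
      pvA_outer cs f (i + 1) (if cs[i] = '\n' then line + 1 else line)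
        (if cs[i] = '\n' then ((i : Int) + 1) else ls) := by
  rw [pvA_outer]; simp only [h, dite_true]; rw [if_neg hpc, if_neg hqo]

-- A's inner loop never moves the position backwards
theorem pvA_inner_ge (cs : List Char) (q : Char) :
    ∀ (fuel i : Nat) (line ls : Int), i ≤ (pvA_inner cs q fuel i line ls).1 := by
  intro fuel
  induction fuel with
  | zero => intro i line ls; simp [pvA_inner]
  | succ n ih =>
    intro i line ls
    by_cases h : i < cs.length
    · by_cases hq : cs[i] = q
      · rw [pvA_inner_stop cs q n i line ls h hq]
      · by_cases hb : cs[i] = '\\' ∧ i + 1 < cs.length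
        · rw [pvA_inner_esc cs q n i line ls h hq hb]
          exact le_trans (by omega) (ih (i + 2) line ls)
        · by_cases hn : cs[i] = '\n'
          · rw [pvA_inner_nl cs q n i line ls h hq hb hn]
            exact le_trans (by omega) (ih (i + 1) (line + 1) ((i : Int) + 1))
          · rw [pvA_inner_other cs q n i line ls h hq hb hn]
            exact le_trans (by omega) (ih (i + 1) line ls)
    · rw [pvA_inner_end cs q i line ls h (n + 1)]

-- fuel irrelevance: both of A's loops compute the same value for any adequate fuel
theorem pvA_inner_irrel (cs : List Char) (q : Char) :
    ∀ (f g i : Nat) (line ls : Int), cs.length ≤ i + f → cs.length ≤ i + g →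
      pvA_inner cs q f i line ls = pvA_inner cs q g i line ls := by
  intro f
  induction f with
  | zero =>
    intro g i line ls hf hg
    have hi : ¬ i < cs.length := by omega
    rw [pvA_inner_end cs q i line ls hi 0, pvA_inner_end cs q i line ls hi g]
  | succ f ih =>
    intro g i line ls hf hg
    by_cases hi : i < cs.length
    · cases g with
      | zero => omega
      | succ g =>
        by_cases hq : cs[i] = q
        · rw [pvA_inner_stop cs q f i line ls hi hq, pvA_inner_stop cs q g i line ls hi hq]
        · by_cases hb : cs[i] = '\\' ∧ i + 1 < cs.length
          · rw [pvA_inner_esc cs q f i line ls hi hq hb, pvA_inner_esc cs q g i line ls hi hq hb]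
            exact ih g (i + 2) line ls (by omega) (by omega)
          · by_cases hn : cs[i] = '\n'
            · rw [pvA_inner_nl cs q f i line ls hi hq hb hn,
                pvA_inner_nl cs q g i line ls hi hq hb hn]
              exact ih g (i + 1) (line + 1) ((i : Int) + 1) (by omega) (by omega)
            · rw [pvA_inner_other cs q f i line ls hi hq hb hn,
                pvA_inner_other cs q g i line ls hi hq hb hn]
              exact ih g (i + 1) line ls (by omega) (by omega)
    · rw [pvA_inner_end cs q i line ls hi (f + 1), pvA_inner_end cs q i line ls hi g]

theorem pvA_outer_irrel (cs : List Char) :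
    ∀ (f g i : Nat) (line ls : Int), cs.length ≤ i + f → cs.length ≤ i + g →
      pvA_outer cs f i line ls = pvA_outer cs g i line ls := by
  intro f
  induction f with
  | zero =>
    intro g i line ls hf hg
    have hi : ¬ i < cs.length := by omega
    rw [pvA_outer_end cs i line ls hi 0, pvA_outer_end cs i line ls hi g]
  | succ f ih =>
    intro g i line ls hf hg
    by_cases hi : i < cs.length
    · cases g with
      | zero => omega
      | succ g =>
        by_cases hpc : (cs.drop i).take 2 = ['%', '}']
        · rw [pvA_outer_pc cs f i line ls hi hpc, pvA_outer_pc cs g i line ls hi hpc]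
        · by_cases hqo : cs[i] = '"' ∨ cs[i] = '\''
          · rw [pvA_outer_quote cs f i line ls hi hpc hqo,
              pvA_outer_quote cs g i line ls hi hpc hqo]
            have hr := pvA_inner_ge cs cs[i] (cs.length + 1) (i + 1)
              (if cs[i] = '\n' then line + 1 else line)
              (if cs[i] = '\n' then ((i : Int) + 1) else ls)
            set r := pvA_inner cs cs[i] (cs.length + 1) (i + 1)
              (if cs[i] = '\n' then line + 1 else line)
              (if cs[i] = '\n' then ((i : Int) + 1) else ls) with hrdef
            by_cases hlt : r.1 < cs.length
            · rw [if_pos hlt, if_pos hlt]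
              exact ih g (r.1 + 1) r.2.1 r.2.2 (by omega) (by omega)
            · rw [if_neg hlt, if_neg hlt]
          · rw [pvA_outer_step cs f i line ls hi hpc hqo,
              pvA_outer_step cs g i line ls hi hpc hqo]
            exact ih g (i + 1) _ _ (by omega) (by omega)
    · rw [pvA_outer_end cs i line ls hi (f + 1), pvA_outer_end cs i line ls hi g]

-- ---- occurrence predicates and the characterisation of B's min-of-finds step ----

-- some pattern of `pats` occurs at position k
def pvOcc (cs : List Char) (pats : List (List Char)) (k : Nat) : Prop :=
  ∃ p ∈ pats, p <+: cs.drop k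

def pvPatsC : List (List Char) := [['%', '}'], ['"'], ['\''], ['\n']]
def pvPatsS (q : Char) : List (List Char) := [[q], ['\\'], ['\n']]

theorem pv_single_prefix (cs : List Char) (c : Char) (k : Nat) :
    [c] <+: cs.drop k ↔ cs[k]? = some c := by
  rw [← List.head?_drop]
  cases cs.drop k <;> simp [List.cons_prefix_iff]

theorem pv_pair_prefix (cs : List Char) (a b : Char) (k : Nat) :
    [a, b] <+: cs.drop k ↔ cs[k]? = some a ∧ cs[k + 1]? = some b := by
  rw [← List.head?_drop, ← List.head?_drop, ← List.tail_drop]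
  cases h : cs.drop k with
  | nil => simp
  | cons x t => cases t <;> simp [List.cons_prefix_iff]

-- an occurrence at k ≥ i is an infix of the tail from i
theorem pv_occ_infix (cs p : List Char) (i k : Nat) (hik : i ≤ k) (h : p <+: cs.drop k) :
    p <:+: cs.drop i := by
  have hd : cs.drop k = (cs.drop i).drop (k - i) := by
    rw [List.drop_drop]; congr 1; omega
  rw [hd] at h
  exact h.isInfix.trans (List.drop_suffix (k - i) (cs.drop i)).isInfix

-- what B's `min(filtered finds)` step means: none ↔ no pattern occurs at any k ≥ i;
-- some j ↔ j is the first position ≥ i where some pattern occurs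
theorem pv_scan (cs : List Char) (pats : List (List Char)) (i : Nat)
    (hi : i ≤ cs.length) (hne : ∀ p ∈ pats, p ≠ []) :
    (PySem.List.min? ((pats.map (fun p => PySem.Chars.findFrom cs p (i : Int) none)).filter
        (· ≠ -1)) (fun x => x) = none → ∀ k, i ≤ k → ¬ pvOcc cs pats k) ∧
    (∀ j, PySem.List.min? ((pats.map (fun p => PySem.Chars.findFrom cs p (i : Int) none)).filter
        (· ≠ -1)) (fun x => x) = some j →
      j = (j.toNat : Int) ∧ i ≤ j.toNat ∧ j.toNat < cs.length ∧ pvOcc cs pats j.toNat ∧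
        ∀ k, i ≤ k → k < j.toNat → ¬ pvOcc cs pats k) := by
  constructor
  · intro hnone k hik ⟨p, hp, hocc⟩
    have hnil := (PySem.List.min?_eq_none_iff _ _).mp hnone
    have hall : ∀ x ∈ pats.map (fun p => PySem.Chars.findFrom cs p (i : Int) none), x = -1 := by
      intro x hx
      by_contra hne1
      have : x ∈ (pats.map (fun p => PySem.Chars.findFrom cs p (i : Int) none)).filter
          (· ≠ -1) := List.mem_filter.mpr ⟨hx, by simpa using hne1⟩
      rw [hnil] at this
      simp at this
    have hfp : PySem.Chars.findFrom cs p (i : Int) none = -1 :=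
      hall _ (List.mem_map.mpr ⟨p, hp, rfl⟩)
    have : ¬ p <:+: cs.drop i := (PySem.Chars.findFrom_natCast_eq_neg_one_iff cs p i hi).mp hfp
    exact this (pv_occ_infix cs p i k hik hocc)
  · intro j hj
    have hjmem := PySem.List.min?_mem hj
    have hjmin := PySem.List.min?_isMin hj
    rcases List.mem_filter.mp hjmem with ⟨hjmap, hjne⟩
    rcases List.mem_map.mp hjmap with ⟨p, hp, hpj⟩
    have hjne' : PySem.Chars.findFrom cs p (i : Int) none ≠ -1 := by rw [hpj]; simpa using hjne
    obtain ⟨hle, hpref, hmin⟩ := PySem.Chars.findFrom_natCast_spec cs p i hi hjne'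
    rw [hpj] at *
    have h0 : (0 : Int) ≤ j := le_trans (by omega) hle
    have hcast : j = (j.toNat : Int) := by omega
    have hij : i ≤ j.toNat := by omega
    have hlen : j.toNat < cs.length := by
      by_contra hc
      have : cs.drop j.toNat = [] := List.drop_eq_nil_of_le (by omega)
      rw [this] at hpref
      exact hne p hp (List.prefix_nil.mp hpref)
    refine ⟨hcast, hij, hlen, ⟨p, hp, hpref⟩, ?_⟩
    intro k hik hkj ⟨p', hp', hocc'⟩
    have hfne' : PySem.Chars.findFrom cs p' (i : Int) none ≠ -1 := by
      rw [Ne, PySem.Chars.findFrom_natCast_eq_neg_one_iff cs p' i hi]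
      intro hno
      exact hno (pv_occ_infix cs p' i k hik hocc')
    obtain ⟨hle', hpref', hmin'⟩ := PySem.Chars.findFrom_natCast_spec cs p' i hi hfne'
    have hmem' : PySem.Chars.findFrom cs p' (i : Int) none ∈
        (pats.map (fun p => PySem.Chars.findFrom cs p (i : Int) none)).filter (· ≠ -1) :=
      List.mem_filter.mpr ⟨List.mem_map.mpr ⟨p', hp', rfl⟩, by simpa using hfne'⟩
    have hjle : j ≤ PySem.Chars.findFrom cs p' (i : Int) none := hjmin _ hmem'
    have hfk : (PySem.Chars.findFrom cs p' (i : Int) none).toNat ≤ k := by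
      by_contra hc
      exact hmin' k hik (by omega) hocc'
    omega

-- consequences of "no pattern occurs at k" for a position inside the string
theorem pv_noC (cs : List Char) (k : Nat) (hk : k < cs.length) (h : ¬ pvOcc cs pvPatsC k) :
    ¬ (cs.drop k).take 2 = ['%', '}'] ∧ ¬ (cs[k] = '"' ∨ cs[k] = '\'') ∧ ¬ cs[k] = '\n' := by
  refine ⟨fun hc => ?_, fun hc => ?_, fun hc => ?_⟩
  · exact h ⟨['%', '}'], by simp [pvPatsC],
      by rw [List.prefix_iff_eq_take]; simpa using hc.symm⟩
  · rcases hc with hc | hc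
    · exact h ⟨['"'], by simp [pvPatsC], (pv_single_prefix cs '"' k).mpr (by simp [hk, hc])⟩
    · exact h ⟨['\''], by simp [pvPatsC], (pv_single_prefix cs '\'' k).mpr (by simp [hk, hc])⟩
  · exact h ⟨['\n'], by simp [pvPatsC], (pv_single_prefix cs '\n' k).mpr (by simp [hk, hc])⟩

theorem pv_noS (cs : List Char) (q : Char) (k : Nat) (hk : k < cs.length)
    (h : ¬ pvOcc cs (pvPatsS q) k) :
    ¬ cs[k] = q ∧ ¬ cs[k] = '\\' ∧ ¬ cs[k] = '\n' := by
  refine ⟨fun hc => ?_, fun hc => ?_, fun hc => ?_⟩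
  · exact h ⟨[q], by simp [pvPatsS], (pv_single_prefix cs q k).mpr (by simp [hk, hc])⟩
  · exact h ⟨['\\'], by simp [pvPatsS], (pv_single_prefix cs '\\' k).mpr (by simp [hk, hc])⟩
  · exact h ⟨['\n'], by simp [pvPatsS], (pv_single_prefix cs '\n' k).mpr (by simp [hk, hc])⟩

-- A's loops step unchanged across a gap with no interesting position
theorem pv_gapA_outer (cs : List Char) :
    ∀ (d i : Nat) (line ls : Int), i + d ≤ cs.length →
      (∀ k, i ≤ k → k < i + d → ¬ pvOcc cs pvPatsC k) →
      ∀ f g, cs.length ≤ i + f → cs.length ≤ (i + d) + g →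
        pvA_outer cs f i line ls = pvA_outer cs g (i + d) line ls := by
  intro d
  induction d with
  | zero => intro i line ls _ _ f g hf hg; exact pvA_outer_irrel cs f g i line ls hf hg
  | succ d ih =>
    intro i line ls hd hno f g hf hg
    have hi : i < cs.length := by omega
    obtain ⟨h1, h2, h3⟩ := pv_noC cs i hi (hno i le_rfl (by omega))
    cases f with
    | zero => omega
    | succ f =>
      rw [pvA_outer_step cs f i line ls hi h1 h2, if_neg h3, if_neg h3]
      have heq : i + (d + 1) = (i + 1) + d := by omega
      rw [heq]
      exact ih (i + 1) line ls (by omega) (fun k hk1 hk2 => hno k (by omega) (by omega))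
        f g (by omega) (by omega)

theorem pv_gapA_inner (cs : List Char) (q : Char) :
    ∀ (d i : Nat) (line ls : Int), i + d ≤ cs.length →
      (∀ k, i ≤ k → k < i + d → ¬ pvOcc cs (pvPatsS q) k) →
      ∀ f g, cs.length ≤ i + f → cs.length ≤ (i + d) + g →
        pvA_inner cs q f i line ls = pvA_inner cs q g (i + d) line ls := by
  intro d
  induction d with
  | zero => intro i line ls _ _ f g hf hg; exact pvA_inner_irrel cs q f g i line ls hf hg
  | succ d ih =>
    intro i line ls hd hno f g hf hg
    have hi : i < cs.length := by omega
    obtain ⟨h1, h2, h3⟩ := pv_noS cs q i hi (hno i le_rfl (by omega))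
    cases f with
    | zero => omega
    | succ f =>
      rw [pvA_inner_other cs q f i line ls hi h1 (fun hc => h2 hc.1) h3]
      have heq : i + (d + 1) = (i + 1) + d := by omega
      rw [heq]
      exact ih (i + 1) line ls (by omega) (fun k hk1 hk2 => hno k (by omega) (by omega))
        f g (by omega) (by omega)

-- ---- B-side step lemmas ----
theorem pvB_end (cs : List Char) (i : Nat) (line ls : Int) (st : Option Char)
    (h : ¬ i < cs.length) : ∀ f, pvB_loop cs f i line ls st = ((i : Int), line, ls)
  | 0 => by cases st <;> rfl
  | f + 1 => by cases st <;> (rw [pvB_loop]; simp [h])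

theorem pvB_none_eq (cs : List Char) (f i : Nat) (line ls : Int) (hi : i < cs.length) :
    pvB_loop cs (f + 1) i line ls none =
      (match PySem.List.min? ((pvPatsC.map
          (fun p => PySem.Chars.findFrom cs p (i : Int) none)).filter (· ≠ -1)) (fun x => x) with
       | none => ((cs.length : Int), line, ls)
       | some j =>
         let c := cs.getD j.toNat ' '
         if c = '%' then (j + 2, line, ls)
         else if c = '\n' then pvB_loop cs f (j.toNat + 1) (line + 1) (j + 1) none
         else pvB_loop cs f (j.toNat + 1) line ls (some c)) := by
  rw [pvB_loop]; simp only [if_pos hi, pvPatsC, List.map]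

theorem pvB_some_eq (cs : List Char) (q : Char) (f i : Nat) (line ls : Int)
    (hi : i < cs.length) :
    pvB_loop cs (f + 1) i line ls (some q) =
      (match PySem.List.min? (((pvPatsS q).map
          (fun p => PySem.Chars.findFrom cs p (i : Int) none)).filter (· ≠ -1)) (fun x => x) with
       | none => ((cs.length : Int), line, ls)
       | some j =>
         let c := cs.getD j.toNat ' '
         if c = '\\' then
           pvB_loop cs f (if j.toNat + 1 < cs.length then j.toNat + 2 else j.toNat + 1) line ls
             (some q)
         else if c = q then pvB_loop cs f (j.toNat + 1) line ls none
         else pvB_loop cs f (j.toNat + 1) (line + 1) (j + 1) (some q)) := by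
  rw [pvB_loop]; simp only [if_pos hi, pvPatsS, List.map]

-- ---- the core equivalence ----

def pvCast (r : Nat × Int × Int) : Int × Int × Int := ((r.1 : Int), r.2.1, r.2.2)

theorem pv_char_of_single (cs : List Char) (c : Char) (k : Nat) (hk : k < cs.length)
    (h : [c] <+: cs.drop k) : cs[k] = c := by
  have h2 := (pv_single_prefix cs c k).mp h
  rw [List.getElem?_eq_getElem hk] at h2
  exact Option.some.inj h2

-- B's jump scan computes A's nested per-character loops, in both modes, for adequate fuels
theorem pv_core (cs : List Char) (n : Nat) :
    ∀ (i : Nat) (line ls : Int), cs.length ≤ i + n →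
    (∀ q, q ≠ '\\' → q ≠ '\n' → ∀ fB fA, cs.length ≤ i + fB → cs.length ≤ i + fA →
      pvB_loop cs fB i line ls (some q) =
        (if (pvA_inner cs q fA i line ls).1 < cs.length then
           pvCast (pvA_outer cs (cs.length + 1) ((pvA_inner cs q fA i line ls).1 + 1)
             (pvA_inner cs q fA i line ls).2.1 (pvA_inner cs q fA i line ls).2.2)
         else pvCast (pvA_inner cs q fA i line ls))) ∧
    (∀ fB fA, cs.length ≤ i + fB → cs.length ≤ i + fA →
      pvB_loop cs fB i line ls none = pvCast (pvA_outer cs fA i line ls)) := by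
  induction n with
  | zero =>
    intro i line ls hn
    have hi : ¬ i < cs.length := by omega
    refine ⟨fun q _ _ fB fA hfB hfA => ?_, fun fB fA hfB hfA => ?_⟩
    · rw [pvB_end cs i line ls (some q) hi fB, pvA_inner_end cs q i line ls hi fA]
      simp [hi, pvCast]
    · rw [pvB_end cs i line ls none hi fB, pvA_outer_end cs i line ls hi fA]; rfl
  | succ n ih =>
    intro i line ls hn
    by_cases hi : i < cs.length
    · have hilen : i ≤ cs.length := le_of_lt hi
      constructor
      · -- string mode: B's jump step vs A's inner loop
        intro q hqbs hqnl fB fA hfB hfA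
        cases fB with
        | zero => omega
        | succ fB =>
        rw [pvB_some_eq cs q fB i line ls hi]
        have hsc := pv_scan cs (pvPatsS q) i hilen (by simp [pvPatsS])
        cases hmin : PySem.List.min? (((pvPatsS q).map
            (fun p => PySem.Chars.findFrom cs p (i : Int) none)).filter (· ≠ -1))
            (fun x => x) with
        | none =>
          have hno := hsc.1 hmin
          have hgap := pv_gapA_inner cs q (cs.length - i) i line ls (by omega)
            (fun k hk1 _ => hno k hk1) fA 0 hfA (by omega)
          rw [show i + (cs.length - i) = cs.length by omega] at hgap
          rw [hgap, pvA_inner_end cs q cs.length line ls (by omega) 0]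
          simp [pvCast]
        | some j =>
          obtain ⟨hjc, hij, hjlen, hocc, hminl⟩ := hsc.2 j hmin
          set jn := j.toNat with hjndef
          have hgap := pv_gapA_inner cs q (jn - i) i line ls (by omega)
            (fun k hk1 hk2 => hminl k hk1 (by omega)) fA (cs.length - jn + 1) hfA (by omega)
          rw [show i + (jn - i) = jn by omega] at hgap
          rw [hgap]
          have hgd : cs.getD jn ' ' = cs[jn] := List.getD_eq_getElem cs ' ' hjlen
          simp only [hjc, Int.toNat_natCast, hgd]
          have hchar : cs[jn] = q ∨ cs[jn] = '\\' ∨ cs[jn] = '\n' := by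
            rcases hocc with ⟨p, hp, hpref⟩
            simp only [pvPatsS, List.mem_cons, List.not_mem_nil, or_false] at hp
            rcases hp with hp | hp | hp <;> subst hp
            · exact Or.inl (pv_char_of_single cs q jn hjlen hpref)
            · exact Or.inr (Or.inl (pv_char_of_single cs '\\' jn hjlen hpref))
            · exact Or.inr (Or.inr (pv_char_of_single cs '\n' jn hjlen hpref))
          rcases hchar with hch | hch | hch
          · -- closing quote at jn
            have hnbs : ¬ cs[jn] = '\\' := fun hc => hqbs ((hch.symm.trans hc))
            rw [hch, if_neg hqbs, if_pos rfl]
            rw [pvA_inner_stop cs q (cs.length - jn) jn line ls hjlen hch]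
            simp only [if_pos hjlen]
            exact (ih (jn + 1) line ls (by omega)).2 fB (cs.length + 1) (by omega) (by omega)
          · -- backslash at jn
            have hnq : ¬ cs[jn] = q := fun hc => hqbs (hc.symm.trans hch)
            rw [hch, if_pos rfl]
            by_cases hnext : jn + 1 < cs.length
            · rw [if_pos hnext]
              rw [show cs.length - jn + 1 = (cs.length - jn) + 1 by omega,
                pvA_inner_esc cs q (cs.length - jn) jn line ls hjlen hnq ⟨hch, hnext⟩]
              exact (ih (jn + 2) line ls (by omega)).1 q hqbs hqnl fB (cs.length - jn)
                (by omega) (by omega)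
            · rw [if_neg hnext]
              rw [show cs.length - jn + 1 = (cs.length - jn) + 1 by omega,
                pvA_inner_other cs q (cs.length - jn) jn line ls hjlen hnq
                  (fun hc => hnext hc.2) (by rw [hch]; decide)]
              exact (ih (jn + 1) line ls (by omega)).1 q hqbs hqnl fB (cs.length - jn)
                (by omega) (by omega)
          · -- newline at jn
            have hnq : ¬ cs[jn] = q := fun hc => hqnl (hc.symm.trans hch)
            rw [hch, if_neg (by decide), if_neg (fun hc => hqnl hc.symm)]
            rw [show cs.length - jn + 1 = (cs.length - jn) + 1 by omega,
              pvA_inner_nl cs q (cs.length - jn) jn line ls hjlen hnq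
                (fun hc => absurd (hch.symm.trans hc.1).symm (by decide)) hch]
            exact (ih (jn + 1) (line + 1) ((jn : Int) + 1) (by omega)).1 q hqbs hqnl fB
              (cs.length - jn) (by omega) (by omega)
      · -- code mode: B's jump step vs A's outer loop
        intro fB fA hfB hfA
        cases fB with
        | zero => omega
        | succ fB =>
        rw [pvB_none_eq cs fB i line ls hi]
        have hsc := pv_scan cs pvPatsC i hilen (by simp [pvPatsC])
        cases hmin : PySem.List.min? ((pvPatsC.map
            (fun p => PySem.Chars.findFrom cs p (i : Int) none)).filter (· ≠ -1))
            (fun x => x) with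
        | none =>
          have hno := hsc.1 hmin
          have hgap := pv_gapA_outer cs (cs.length - i) i line ls (by omega)
            (fun k hk1 _ => hno k hk1) fA 0 hfA (by omega)
          rw [show i + (cs.length - i) = cs.length by omega] at hgap
          rw [hgap, pvA_outer_end cs cs.length line ls (by omega) 0]
          simp [pvCast]
        | some j =>
          obtain ⟨hjc, hij, hjlen, hocc, hminl⟩ := hsc.2 j hmin
          set jn := j.toNat with hjndef
          have hgap := pv_gapA_outer cs (jn - i) i line ls (by omega)
            (fun k hk1 hk2 => hminl k hk1 (by omega)) fA (cs.length - jn + 1) hfA (by omega)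
          rw [show i + (jn - i) = jn by omega] at hgap
          rw [hgap]
          have hgd : cs.getD jn ' ' = cs[jn] := List.getD_eq_getElem cs ' ' hjlen
          simp only [hjc, Int.toNat_natCast, hgd]
          by_cases hpc : ['%', '}'] <+: cs.drop jn
          · -- "%}" at jn
            have htake : (cs.drop jn).take 2 = ['%', '}'] := by
              have := List.prefix_iff_eq_take.mp hpc
              simpa using this.symm
            have hpct : cs[jn] = '%' := by
              obtain ⟨h1, _⟩ := (pv_pair_prefix cs '%' '}' jn).mp hpc
              rw [List.getElem?_eq_getElem hjlen] at h1
              exact Option.some.inj h1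
            rw [hpct, if_pos rfl,
              show cs.length - jn + 1 = (cs.length - jn) + 1 by omega,
              pvA_outer_pc cs (cs.length - jn) jn line ls hjlen htake]
            simp [pvCast]
          · have htake : ¬ (cs.drop jn).take 2 = ['%', '}'] := by
              intro hc
              exact hpc (by rw [List.prefix_iff_eq_take]; simpa using hc.symm)
            have hchar : cs[jn] = '"' ∨ cs[jn] = '\'' ∨ cs[jn] = '\n' := by
              rcases hocc with ⟨p, hp, hpref⟩
              simp only [pvPatsC, List.mem_cons, List.not_mem_nil, or_false] at hp
              rcases hp with hp | hp | hp | hp <;> subst hp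
              · exact absurd hpref hpc
              · exact Or.inl (pv_char_of_single cs '"' jn hjlen hpref)
              · exact Or.inr (Or.inl (pv_char_of_single cs '\'' jn hjlen hpref))
              · exact Or.inr (Or.inr (pv_char_of_single cs '\n' jn hjlen hpref))
            rcases hchar with hch | hch | hch
            all_goals rw [hch]
            · -- double quote
              rw [if_neg (by decide), if_neg (by decide),
                show cs.length - jn + 1 = (cs.length - jn) + 1 by omega,
                pvA_outer_quote cs (cs.length - jn) jn line ls hjlen htake (by rw [hch]; left; rfl)]
              rw [hch]
              simp only [if_neg (by decide : ¬ ('"' : Char) = '\n')]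
              have hB := (ih (jn + 1) line ls (by omega)).1 '"' (by decide) (by decide) fB
                (cs.length + 1) (by omega) (by omega)
              rw [hB]
              have hr1 := pvA_inner_ge cs '"' (cs.length + 1) (jn + 1) line ls
              set r := pvA_inner cs '"' (cs.length + 1) (jn + 1) line ls with hrdef
              by_cases hlt : r.1 < cs.length
              · rw [if_pos hlt, if_pos hlt]
                rw [pvA_outer_irrel cs (cs.length + 1) (cs.length - jn) (r.1 + 1) r.2.1 r.2.2
                  (by omega) (by omega)]
              · rw [if_neg hlt, if_neg hlt]
            · -- single quote
              rw [if_neg (by decide), if_neg (by decide),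
                show cs.length - jn + 1 = (cs.length - jn) + 1 by omega,
                pvA_outer_quote cs (cs.length - jn) jn line ls hjlen htake (by rw [hch]; right; rfl)]
              rw [hch]
              simp only [if_neg (by decide : ¬ ('\'' : Char) = '\n')]
              have hB := (ih (jn + 1) line ls (by omega)).1 '\'' (by decide) (by decide) fB
                (cs.length + 1) (by omega) (by omega)
              rw [hB]
              have hr1 := pvA_inner_ge cs '\'' (cs.length + 1) (jn + 1) line ls
              set r := pvA_inner cs '\'' (cs.length + 1) (jn + 1) line ls with hrdef
              by_cases hlt : r.1 < cs.length
              · rw [if_pos hlt, if_pos hlt]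
                rw [pvA_outer_irrel cs (cs.length + 1) (cs.length - jn) (r.1 + 1) r.2.1 r.2.2
                  (by omega) (by omega)]
              · rw [if_neg hlt, if_neg hlt]
            · -- newline
              rw [if_neg (by decide), if_pos rfl,
                show cs.length - jn + 1 = (cs.length - jn) + 1 by omega,
                pvA_outer_step cs (cs.length - jn) jn line ls hjlen htake (by rw [hch]; decide)]
              rw [hch]
              simp only [if_pos rfl]
              exact (ih (jn + 1) (line + 1) ((jn : Int) + 1) (by omega)).2 fB (cs.length - jn)
                (by omega) (by omega)
    · refine ⟨fun q _ _ fB fA hfB hfA => ?_, fun fB fA hfB hfA => ?_⟩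
      · rw [pvB_end cs i line ls (some q) hi fB, pvA_inner_end cs q i line ls hi fA]
        simp [hi, pvCast]
      · rw [pvB_end cs i line ls none hi fB, pvA_outer_end cs i line ls hi fA]; rfl

-- ===== VERDICT (by name: the statement is the Claim_ definition above) =====
theorem find_closing_percent_py_spec : Claim_equal_find_closing_percent_py := by
  intro code pos line line_start _ _
  unfold Spec_find_closing_percent_py find_closing_percent_py find_closing_percent_py_alt
  rw [(pv_core code.toList code.toList.length pos.toNat line line_start (by omega)).2
    (code.toList.length + 1) (code.toList.length + 1) (by omega) (by omega)]
  rfl
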